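-- pv_equiv track=rewrite | github.com/Nanjayan/Data_structures_Coursera | Assignments/week2_priority_queues_and_disjoint_sets/1_make_heap/build_heap.py | build_heap
-- ===== SOURCE A (Python) =====
-- import math
--
-- def build_heap(data):
--     """Build a heap from ``data`` inplace.
--
--     Returns a sequence of swaps performed by the algorithm.
--     """
--     # The following advanced implementation just sorts the given sequence
--     # using selection sort algorithm and saves the resulting sequence
--     # of swaps. This turns the given array into a binary heap
--
--     # implement a binary heap tree for faster implementation
--
--     swaps=[]
--     def siftdown(i,n,H):
--         minindex=i
--         l=2*i+1
--         if l<n and H[l]<H[minindex]: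
--             minindex=l
--         r=2*i+2
--         if r<n and H[r]<H[minindex]:
--             minindex=r
--         if i != minindex:
--             swaps.append((i,minindex))
--             temp=H[i]
--             H[i]=H[minindex]
--             H[minindex]=temp
--             siftdown(minindex,n,H)
--
--
--
--     n=len(data)
--     for i in range(math.floor((n-1)/2),-1,-1):
--         siftdown(i,n,data)
--
--     return swaps
-- ===== SOURCE B (Python) =====
-- def build_heap(data):
--     """Build a heap from ``data`` inplace; return the list of swaps performed."""
--     n = len(data)
--
--     def sift(j):
--         # iterative sift-down: return the swaps made along the descent path
--         path = []
--         while True: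
--             m = j
--             if 2 * j + 1 < n and data[2 * j + 1] < data[m]:
--                 m = 2 * j + 1
--             if 2 * j + 2 < n and data[2 * j + 2] < data[m]:
--                 m = 2 * j + 2
--             if m == j:
--                 return path
--             path.append((j, m))
--             data[j], data[m] = data[m], data[j]
--             j = m
--
--     swaps = []
--     for i in reversed(range((n + 1) // 2)):
--         swaps += sift(i)
--     return swaps
-- ===== Notes on version B (the rewrite author's own statement) =====
-- stated objective: alternative
-- what changed: The recursive siftdown appending to a closure-shared swaps list becomes an iterative while-loop sift-down returning its own swap path per start node, with the paths concatenated by the outer loop.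
import Mathlib
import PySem

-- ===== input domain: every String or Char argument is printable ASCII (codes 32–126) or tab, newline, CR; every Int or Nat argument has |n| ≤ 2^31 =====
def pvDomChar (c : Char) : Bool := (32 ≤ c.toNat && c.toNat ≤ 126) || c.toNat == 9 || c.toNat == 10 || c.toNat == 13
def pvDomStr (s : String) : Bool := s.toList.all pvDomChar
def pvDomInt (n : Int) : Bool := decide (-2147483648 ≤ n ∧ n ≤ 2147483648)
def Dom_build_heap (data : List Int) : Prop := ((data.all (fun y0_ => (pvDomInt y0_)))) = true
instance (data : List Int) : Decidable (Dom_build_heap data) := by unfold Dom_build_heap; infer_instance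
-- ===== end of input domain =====

-- B replaces A's recursive siftdown (with a shared mutable swap list) by an iterative
-- sift-down whose per-node swap paths are concatenated; same return value, and B performs
-- the same in-place mutation of `data` as A (equivalence here is about the return value).


-- ===== PORT A =====
-- A's recursive siftdown: threads the shared `swaps` accumulator (the Python
-- closure list) through the recursion; Nat indices are exact here since every
-- reachable Python index is ≥ 0 and H[l] is read only under the guard l < n.
def siftdownA (n : Nat) (i : Nat) (H : List Int) (swaps : List (Int × Int)) :
    List Int × List (Int × Int) :=
  let minindex1 := if 2*i+1 < n ∧ H.getD (2*i+1) 0 < H.getD i 0 then 2*i+1 else i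
  let minindex := if 2*i+2 < n ∧ H.getD (2*i+2) 0 < H.getD minindex1 0 then 2*i+2 else minindex1
  if i = minindex then (H, swaps)
  else
    let temp := H.getD i 0
    siftdownA n minindex ((H.set i (H.getD minindex 0)).set minindex temp)
      (swaps ++ [((i : Int), (minindex : Int))])
termination_by n - i
decreasing_by
  simp only [minindex, minindex1] at *
  split_ifs at * <;> omega

-- Python: for i in range(math.floor((n-1)/2), -1, -1): those i are exactly
-- (n+1)/2 - 1, …, 1, 0, i.e. (List.range ((n+1)/2)).reverse.
def build_heap (data : List Int) : List (Int × Int) :=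
  let n := data.length
  ((List.range ((n+1)/2)).reverse.foldl
    (fun st i => siftdownA n i st.1 st.2) (data, [])).2

-- ===== PORT B =====
-- B's iterative sift: the while-loop becomes a recursion returning the local
-- `path` of this descent (built front-to-back), no shared accumulator.
def siftB (n : Nat) (j : Nat) (H : List Int) : List Int × List (Int × Int) :=
  let m1 := if 2*j+1 < n ∧ H.getD (2*j+1) 0 < H.getD j 0 then 2*j+1 else j
  let m := if 2*j+2 < n ∧ H.getD (2*j+2) 0 < H.getD m1 0 then 2*j+2 else m1
  if j = m then (H, [])
  else
    let res := siftB n m ((H.set j (H.getD m 0)).set m (H.getD j 0))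
    (res.1, ((j : Int), (m : Int)) :: res.2)
termination_by n - j
decreasing_by
  simp only [m, m1] at *
  split_ifs at * <;> omega

-- for i in reversed(range(k)): swaps = sift(k-1) ++ sift(k-2) ++ … ++ sift(0)
def buildB (n : Nat) : Nat → List Int → List Int × List (Int × Int)
  | 0, H => (H, [])
  | k+1, H =>
    let s := siftB n k H
    let rest := buildB n k s.1
    (rest.1, s.2 ++ rest.2)

def build_heap_alt (data : List Int) : List (Int × Int) :=
  (buildB data.length ((data.length + 1) / 2) data).2

-- ===== PRECONDITION & SPEC =====
def Spec_build_heap (data : List Int) (out : List (Int × Int)) : Prop := out = build_heap_alt data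
instance (data : List Int) (out : List (Int × Int)) : Decidable (Spec_build_heap data out) := by unfold Spec_build_heap; infer_instance

-- ===== CLAIM (what is proved, stated in full; the proofs are below) =====
def Claim_equal_build_heap : Prop := ∀ (data : List Int), Dom_build_heap data → Spec_build_heap data (build_heap data)

-- ===== LEMMAS AND PROOFS =====

theorem siftdownA_eq_siftB (n i : Nat) (H : List Int) (swaps : List (Int × Int)) :
    siftdownA n i H swaps = ((siftB n i H).1, swaps ++ (siftB n i H).2) := by
  induction i, H, swaps using siftdownA.induct n with
  | case1 i H swaps m1 m h =>
    rw [siftdownA, siftB]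
    simp only [m, m1, dite_eq_ite] at h ⊢
    rw [if_pos h, if_pos h]
    simp
  | case2 i H swaps m1 m h temp ih =>
    rw [siftdownA]
    conv_rhs => rw [siftB]
    simp only [m, m1, temp, dite_eq_ite] at h ih ⊢
    rw [if_neg h, if_neg h, ih]
    simp

theorem buildB_eq (n k : Nat) (H : List Int) (swaps : List (Int × Int)) :
    (List.range k).reverse.foldl (fun st i => siftdownA n i st.1 st.2) (H, swaps)
      = ((buildB n k H).1, swaps ++ (buildB n k H).2) := by
  induction k generalizing H swaps with
  | zero => simp [buildB]
  | succ k ih =>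
    rw [List.range_succ]
    simp only [List.reverse_append, List.reverse_cons, List.reverse_nil, List.nil_append,
      List.cons_append, List.foldl_cons]
    rw [siftdownA_eq_siftB, ih]
    simp [buildB, List.append_assoc]

-- ===== VERDICT (by name: the statement is the Claim_ definition above) =====
theorem build_heap_spec : Claim_equal_build_heap := by
  intro data _
  show ((List.range ((data.length + 1) / 2)).reverse.foldl
      (fun st i => siftdownA data.length i st.1 st.2) (data, [])).2
    = (buildB data.length ((data.length + 1) / 2) data).2
  rw [buildB_eq]
  simp
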